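-- pv_equiv track=rewrite | github.com/posl/comment_recommendation | script/split_gen/2_time/zh/267_C/5.py | solve
-- ===== SOURCE A (Python) =====
-- def solve(n, m, a):
--     b = [0] * (n + 1)
--     for i in range(n):
--         b[i + 1] = b[i] + a[i]
--     c = [0] * (n + 1)
--     for i in range(n):
--         c[i + 1] = max(c[i], b[i + 1])
--     d = [0] * (n + 1)
--     for i in range(n):
--         d[i + 1] = max(d[i], c[i + 1] + b[i + 1])
--     res = 0
--     for i in range(1, m + 1):
--         res = max(res, d[i] + b[i])
--     return res
-- ===== SOURCE B (Python) =====
-- def solve(n, m, a):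
--     # prefix sums p[0..n]
--     p = [0]
--     for i in range(n):
--         p.append(p[-1] + a[i])
--     k = m if m > 0 else 0
--     q = [p[j] for j in range(k + 1)]
--     # suffix maxima of q, built right-to-left
--     suf = []
--     for x in reversed(q):
--         suf.append(x if not suf or x > suf[-1] else suf[-1])
--     suf.reverse()
--     # pivot j: answer = max over j of max(p[:j+1]) + p[j] + max(p[j:k+1])
--     best = pre = 0
--     for x, s in zip(q, suf):
--         pre = max(pre, x)
--         best = max(best, pre + x + s)
--     return best
-- ===== Notes on version B (the rewrite author's own statement) =====
-- stated objective: alternative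
-- what changed: Replaces A's chained running-max recurrences (c = running max of prefix sums, d = running max of c+b, then a scan of d+b) by the pivot characterization: the answer equals max over pivots j in 0..m of (max of prefix sums up to j) + p[j] + (suffix maximum of prefix sums over j..m), computed with one backward suffix-maxima pass and one forward pivot scan; A's d-array and its recurrence do not appear in B at all.
import Mathlib
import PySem

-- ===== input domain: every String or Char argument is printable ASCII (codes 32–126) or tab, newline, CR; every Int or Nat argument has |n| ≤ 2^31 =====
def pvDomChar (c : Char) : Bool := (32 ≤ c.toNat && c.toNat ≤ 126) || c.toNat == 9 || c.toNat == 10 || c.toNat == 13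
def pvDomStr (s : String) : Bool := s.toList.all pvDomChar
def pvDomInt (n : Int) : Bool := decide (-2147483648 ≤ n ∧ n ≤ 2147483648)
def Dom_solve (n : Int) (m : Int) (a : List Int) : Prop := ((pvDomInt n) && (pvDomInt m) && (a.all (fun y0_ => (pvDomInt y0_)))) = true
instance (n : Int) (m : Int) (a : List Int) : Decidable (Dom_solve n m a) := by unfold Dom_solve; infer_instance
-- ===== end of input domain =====

-- B replaces A's chained running-max recurrences by the pivot characterization
-- (prefix-max + prefix-sum + suffix-max over each pivot), a different algorithm of the same cost.

-- ===== PORT A =====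
def solve (n : Int) (m : Int) (a : List Int) : Int :=
  let b := (PySem.List.pyRange 0 n 1).foldl
    (fun b i => PySem.List.pySetD b (i + 1)
      (PySem.List.pyGetD b i 0 + PySem.List.pyGetD a i 0))
    (List.replicate (n + 1).toNat 0)
  let c := (PySem.List.pyRange 0 n 1).foldl
    (fun c i => PySem.List.pySetD c (i + 1)
      (max (PySem.List.pyGetD c i 0) (PySem.List.pyGetD b (i + 1) 0)))
    (List.replicate (n + 1).toNat 0)
  let d := (PySem.List.pyRange 0 n 1).foldl
    (fun d i => PySem.List.pySetD d (i + 1)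
      (max (PySem.List.pyGetD d i 0)
        (PySem.List.pyGetD c (i + 1) 0 + PySem.List.pyGetD b (i + 1) 0)))
    (List.replicate (n + 1).toNat 0)
  (PySem.List.pyRange 1 (m + 1) 1).foldl
    (fun res i => max res (PySem.List.pyGetD d i 0 + PySem.List.pyGetD b i 0)) 0

-- ===== PORT B =====
def solve_alt (n : Int) (m : Int) (a : List Int) : Int :=
  let p := (PySem.List.pyRange 0 n 1).foldl
    (fun p i => p ++ [PySem.List.pyGetD p (-1) 0 + PySem.List.pyGetD a i 0]) [0]
  let k : Int := if m > 0 then m else 0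
  let q := (PySem.List.pyRange 0 (k + 1) 1).map (fun j => PySem.List.pyGetD p j 0)
  let suf := (q.reverse.foldl
    (fun s x => s ++ [match s.getLast? with
                      | none => x
                      | some y => if x > y then x else y]) []).reverse
  let r := (q.zip suf).foldl
    (fun (st : Int × Int) xs =>
      let pre := max st.1 xs.1
      (pre, max st.2 (pre + xs.1 + xs.2))) (0, 0)
  r.2

-- ===== PRECONDITION & SPEC =====
-- Pre_solve holds exactly where Python A returns normally: A raises IndexError when
-- n > len(a) (reading a[i]) or when 0 < m and m > n (reading d[m]/b[m]).
def Pre_solve (n : Int) (m : Int) (a : List Int) : Prop :=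
  n ≤ (a.length : Int) ∧ (m ≤ n ∨ m ≤ 0)
instance (n : Int) (m : Int) (a : List Int) : Decidable (Pre_solve n m a) := by
  unfold Pre_solve; infer_instance
def pvWitness_solve : Int × Int × List Int := (2, 2, [3, -1])

def Spec_solve (n : Int) (m : Int) (a : List Int) (out : Int) : Prop := out = solve_alt n m a
instance (n : Int) (m : Int) (a : List Int) (out : Int) : Decidable (Spec_solve n m a out) := by
  unfold Spec_solve; infer_instance

-- ===== CLAIM (what is proved, stated in full; the proofs are below) =====
def Claim_equal_solve : Prop := ∀ (n : Int) (m : Int) (a : List Int), Dom_solve n m a → Pre_solve n m a → Spec_solve n m a (solve n m a)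

-- ===== LEMMAS AND PROOFS =====

-- Mathematical values of A's arrays at index k: prefix sum, running max of prefix
-- sums, running max of c+b; and A's result accumulator over 1..k.
def pvB (a : List Int) : Nat → Int
  | 0 => 0
  | k + 1 => pvB a k + a.getD k 0

def pvC (a : List Int) : Nat → Int
  | 0 => 0
  | k + 1 => max (pvC a k) (pvB a (k + 1))

def pvD (a : List Int) : Nat → Int
  | 0 => 0
  | k + 1 => max (pvD a k) (pvC a (k + 1) + pvB a (k + 1))

def pvRsU (a : List Int) : Nat → Int
  | 0 => 0
  | k + 1 => max (pvRsU a k) (pvD a (k + 1) + pvB a (k + 1))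

-- B-side values: pvS a k c = max of prefix sums over indices k-c .. k;
-- pvG a k j = B's best accumulator after pivots 0..j with pivot range 0..k.
def pvS (a : List Int) (k : Nat) : Nat → Int
  | 0 => pvB a k
  | c + 1 => max (pvS a k c) (pvB a (k - (c + 1)))

def pvG (a : List Int) (k : Nat) : Nat → Int
  | 0 => max 0 (pvS a k k)
  | j + 1 => max (pvG a k j) (pvC a (j + 1) + pvB a (j + 1) + pvS a k (k - (j + 1)))

-- Generic invariant for A's three array-building loops.
lemma pvLoop (F : Int → Int → Int) (s : Nat → Int) (hs0 : s 0 = 0) (N : Nat)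
    (hF : ∀ k, k < N → F (s k) (k : Int) = s (k + 1)) :
    ∀ j, j ≤ N →
      ((List.range j).map (fun k => ((k : Nat) : Int))).foldl
        (fun arr i => PySem.List.pySetD arr (i + 1) (F (PySem.List.pyGetD arr i 0) i))
        (List.replicate (N + 1) (0 : Int))
      = (List.range (j + 1)).map s ++ List.replicate (N - j) 0 := by
  intro j
  induction j with
  | zero =>
    intro _
    simp [List.range_succ, hs0, List.replicate_succ]
  | succ j ih =>
    intro hj
    rw [List.range_succ, List.map_append, List.foldl_append, ih (by omega)]
    simp only [List.map_cons, List.map_nil, List.foldl_cons, List.foldl_nil]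
    have hlen : ((List.range (j + 1)).map s).length = j + 1 := by simp
    have hget : PySem.List.pyGetD ((List.range (j + 1)).map s ++ List.replicate (N - j) 0) ((j : Nat) : Int) 0 = s j := by
      rw [PySem.List.pyGetD_natCast, List.getD_append _ _ _ _ (by simp),
        PySem.List.getD_map_range s (j + 1) j 0 (by omega)]
    rw [hget, hF j (by omega)]
    have hidx : ((j : Nat) : Int) + 1 = (((j + 1 : Nat)) : Int) := by push_cast; ring
    rw [hidx, PySem.List.pySetD_natCast]
    rw [List.set_append]
    simp only [hlen, lt_irrefl, if_false, Nat.sub_self]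
    have hrep : List.replicate (N - j) (0 : Int) = 0 :: List.replicate (N - (j + 1)) 0 := by
      have : N - j = (N - (j + 1)) + 1 := by omega
      rw [this, List.replicate_succ]
    rw [hrep]
    simp [List.range_succ, List.set_cons_zero]

lemma pvLoopB (a : List Int) (N : Nat) :
    ((List.range N).map (fun k => ((k : Nat) : Int))).foldl
      (fun arr i => PySem.List.pySetD arr (i + 1)
        (PySem.List.pyGetD arr i 0 + PySem.List.pyGetD a i 0))
      (List.replicate (N + 1) (0 : Int))
    = (List.range (N + 1)).map (pvB a) := by
  have h := pvLoop (fun p i => p + PySem.List.pyGetD a i 0) (pvB a) rfl N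
    (fun k _ => by simp [pvB]) N (le_refl N)
  simpa using h

lemma pvGetMap (f : Nat → Int) (N k : Nat) (hk : k < N + 1) :
    PySem.List.pyGetD ((List.range (N + 1)).map f) ((k : Nat) : Int) 0 = f k := by
  rw [PySem.List.pyGetD_natCast, PySem.List.getD_map_range f (N + 1) k 0 hk]

lemma pvLoopC (a : List Int) (N : Nat) :
    ((List.range N).map (fun k => ((k : Nat) : Int))).foldl
      (fun arr i => PySem.List.pySetD arr (i + 1)
        (max (PySem.List.pyGetD arr i 0)
          (PySem.List.pyGetD ((List.range (N + 1)).map (pvB a)) (i + 1) 0)))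
      (List.replicate (N + 1) (0 : Int))
    = (List.range (N + 1)).map (pvC a) := by
  have h := pvLoop
    (fun p i => max p (PySem.List.pyGetD ((List.range (N + 1)).map (pvB a)) (i + 1) 0))
    (pvC a) rfl N
    (fun k hk => by
      show max (pvC a k) (PySem.List.pyGetD ((List.range (N + 1)).map (pvB a)) (((k : Nat) : Int) + 1) 0) = pvC a (k + 1)
      have hc : ((k : Nat) : Int) + 1 = (((k + 1 : Nat)) : Int) := by push_cast; ring
      rw [hc, pvGetMap (pvB a) N (k + 1) (by omega)]
      simp [pvC]) N (le_refl N)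
  simpa using h

lemma pvLoopD (a : List Int) (N : Nat) :
    ((List.range N).map (fun k => ((k : Nat) : Int))).foldl
      (fun arr i => PySem.List.pySetD arr (i + 1)
        (max (PySem.List.pyGetD arr i 0)
          (PySem.List.pyGetD ((List.range (N + 1)).map (pvC a)) (i + 1) 0 +
           PySem.List.pyGetD ((List.range (N + 1)).map (pvB a)) (i + 1) 0)))
      (List.replicate (N + 1) (0 : Int))
    = (List.range (N + 1)).map (pvD a) := by
  have h := pvLoop
    (fun p i => max p (PySem.List.pyGetD ((List.range (N + 1)).map (pvC a)) (i + 1) 0 +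
      PySem.List.pyGetD ((List.range (N + 1)).map (pvB a)) (i + 1) 0))
    (pvD a) rfl N
    (fun k hk => by
      show max (pvD a k) (PySem.List.pyGetD ((List.range (N + 1)).map (pvC a)) (((k : Nat) : Int) + 1) 0 + PySem.List.pyGetD ((List.range (N + 1)).map (pvB a)) (((k : Nat) : Int) + 1) 0) = pvD a (k + 1)
      have hc : ((k : Nat) : Int) + 1 = (((k + 1 : Nat)) : Int) := by push_cast; ring
      rw [hc, pvGetMap (pvC a) N (k + 1) (by omega), pvGetMap (pvB a) N (k + 1) (by omega)]
      simp [pvD]) N (le_refl N)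
  simpa using h

-- A's final scan over range(1, t+1) computes the accumulator.
lemma pvResA (a : List Int) (N : Nat) :
    ∀ t : Nat, t ≤ N →
      (PySem.List.pyRange 1 ((t : Int) + 1) 1).foldl
        (fun res i => max res
          (PySem.List.pyGetD ((List.range (N + 1)).map (pvD a)) i 0 +
           PySem.List.pyGetD ((List.range (N + 1)).map (pvB a)) i 0)) 0
      = pvRsU a t := by
  intro t
  induction t with
  | zero =>
    intro _
    rw [PySem.List.pyRange_one_eq_nil (by norm_num)]
    simp [pvRsU]
  | succ t ih =>
    intro ht
    have hc : (((t + 1 : Nat)) : Int) + 1 = ((t : Int) + 1) + 1 := by push_cast; ring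
    rw [hc, PySem.List.pyRange_one_succ_right (by omega), List.foldl_append, ih (by omega)]
    simp only [List.foldl_cons, List.foldl_nil]
    have hi : ((t : Int) + 1) = (((t + 1 : Nat)) : Int) := by push_cast; ring
    rw [hi, pvGetMap (pvD a) N (t + 1) (by omega), pvGetMap (pvB a) N (t + 1) (by omega)]
    rfl

-- A's value on Pre_: pvRsU a m.toNat.
lemma pvSolveA (n m : Int) (a : List Int) (_hlen : n ≤ (a.length : Int)) (hm : m ≤ n ∨ m ≤ 0) :
    solve n m a = pvRsU a m.toNat := by
  simp only [solve]
  by_cases hn : 0 ≤ n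
  · set N := n.toNat with hN
    have hnN : n = ((N : Nat) : Int) := by omega
    have hrange : PySem.List.pyRange 0 n 1 = (List.range N).map (fun k => ((k : Nat) : Int)) := by
      rw [hnN]; exact PySem.List.pyRange_zero_nat N
    have hrep : (n + 1).toNat = N + 1 := by omega
    rw [hrange, hrep, pvLoopB a N, pvLoopC a N, pvLoopD a N]
    have hmN : m.toNat ≤ N := by omega
    by_cases hm0 : 0 ≤ m
    · have : m + 1 = ((m.toNat : Nat) : Int) + 1 := by omega
      rw [this, pvResA a N m.toNat hmN]
    · rw [PySem.List.pyRange_one_eq_nil (by omega)]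
      have h0 : m.toNat = 0 := by omega
      simp [h0, pvRsU]
  · have h0 : PySem.List.pyRange 0 n 1 = [] := PySem.List.pyRange_one_eq_nil (by omega)
    have hres : PySem.List.pyRange 1 (m + 1) 1 = [] := by
      apply PySem.List.pyRange_one_eq_nil; omega
    have hmt : m.toNat = 0 := by omega
    rw [h0, hres]
    simp [hmt, pvRsU]

-- B's prefix-sum loop builds the list of prefix sums of a.
lemma pvPrefix (a : List Int) : ∀ N : Nat,
    ((List.range N).map (fun k => ((k : Nat) : Int))).foldl
      (fun p i => p ++ [PySem.List.pyGetD p (-1) 0 + PySem.List.pyGetD a i 0]) [0]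
    = (List.range (N + 1)).map (pvB a) := by
  intro N
  induction N with
  | zero => simp [List.range_succ, pvB]
  | succ N ih =>
    rw [List.range_succ (n := N), List.map_append, List.foldl_append, ih]
    simp only [List.map_cons, List.map_nil, List.foldl_cons, List.foldl_nil]
    have hlast : (List.range (N + 1)).map (pvB a)
        = (List.range N).map (pvB a) ++ [pvB a N] := by
      rw [List.range_succ, List.map_append]; rfl
    rw [hlast, PySem.List.pyGetD_neg_one_append_singleton, PySem.List.pyGetD_natCast]
    have hnew : pvB a N + a.getD N 0 = pvB a (N + 1) := rfl
    rw [hnew, List.range_succ (n := N + 1), List.map_append, ← hlast]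
    rfl

-- Reversing a map over range flips the index.
lemma pvRevMap (f : Nat → Int) : ∀ j, ((List.range (j + 1)).map f).reverse
    = (List.range (j + 1)).map (fun t => f (j - t)) := by
  intro j
  rw [List.range_eq_range', ← List.map_reverse, List.reverse_range']
  simp [Function.comp_def, ← List.range_eq_range']

-- B's backward pass computes the scan of maxima pvS.
lemma pvScan (l : List Int) (k : Nat) : ∀ j,
    ((List.range (j + 1)).map (fun t => pvB l (k - t))).foldl
      (fun s x => s ++ [match s.getLast? with
                        | none => x
                        | some y => if x > y then x else y]) []
    = (List.range (j + 1)).map (pvS l k) := by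
  intro j
  induction j with
  | zero => simp [pvS]
  | succ j ih =>
    rw [List.range_succ (n := j + 1), List.map_append, List.foldl_append, ih]
    simp only [List.map_cons, List.map_nil, List.foldl_cons, List.foldl_nil]
    have hlast : ((List.range (j + 1)).map (pvS l k)).getLast? = some (pvS l k j) := by
      rw [List.range_succ, List.map_append]
      simp
    rw [hlast]
    have hmax : (match some (pvS l k j) with
                 | none => pvB l (k - (j + 1))
                 | some y => if pvB l (k - (j + 1)) > y then pvB l (k - (j + 1)) else y)
        = pvS l k (j + 1) := by
      show (if pvB l (k - (j + 1)) > pvS l k j then pvB l (k - (j + 1)) else pvS l k j)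
        = max (pvS l k j) (pvB l (k - (j + 1)))
      by_cases h : pvB l (k - (j + 1)) > pvS l k j
      · rw [if_pos h, max_eq_right h.le]
      · rw [if_neg h, max_eq_left (by omega)]
    rw [hmax, List.map_append]
    rfl

-- B's final fold over pivots maintains (prefix max, best so far).
lemma pvFold (l : List Int) (k : Nat) : ∀ j,
    ((List.range (j + 1)).map (fun t => (pvB l t, pvS l k (k - t)))).foldl
      (fun (st : Int × Int) xs =>
        let pre := max st.1 xs.1
        (pre, max st.2 (pre + xs.1 + xs.2))) (0, 0)
    = (pvC l j, pvG l k j) := by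
  intro j
  induction j with
  | zero =>
    show (max 0 (pvB l 0), max 0 (max 0 (pvB l 0) + pvB l 0 + pvS l k (k - 0))) = _
    have h0 : pvB l 0 = 0 := rfl
    simp [h0, pvC, pvG]
  | succ j ih =>
    rw [List.range_succ (n := j + 1), List.map_append, List.foldl_append, ih]
    simp only [List.map_cons, List.map_nil, List.foldl_cons, List.foldl_nil]
    show (max (pvC l j) (pvB l (j + 1)),
      max (pvG l k j) (max (pvC l j) (pvB l (j + 1)) + pvB l (j + 1) + pvS l k (k - (j + 1)))) = _
    rfl

-- Extending the pivot range by one: the suffix max gains the new prefix sum.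
lemma pvSExt (l : List Int) (k : Nat) : ∀ c, c ≤ k →
    pvS l (k + 1) (c + 1) = max (pvS l k c) (pvB l (k + 1)) := by
  intro c
  induction c with
  | zero =>
    intro _
    show max (pvS l (k + 1) 0) (pvB l (k + 1 - 1)) = _
    simp only [pvS, Nat.add_sub_cancel]
    exact max_comm _ _
  | succ c ihc =>
    intro hc
    show max (pvS l (k + 1) (c + 1)) (pvB l (k + 1 - (c + 2))) = _
    rw [ihc (by omega)]
    have h1 : k + 1 - (c + 2) = k - (c + 1) := by omega
    rw [h1]
    show max (max (pvS l k c) (pvB l (k + 1))) (pvB l (k - (c + 1)))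
      = max (max (pvS l k c) (pvB l (k - (c + 1)))) (pvB l (k + 1))
    rw [max_right_comm]

-- Extending the pivot range by one shifts pvG by pvD + the new prefix sum.
lemma pvGExt (l : List Int) (k : Nat) : ∀ j, j ≤ k →
    pvG l (k + 1) j = max (pvG l k j) (pvD l j + pvB l (k + 1)) := by
  intro j
  induction j with
  | zero =>
    intro _
    show max 0 (pvS l (k + 1) (k + 1)) = max (max 0 (pvS l k k)) (pvD l 0 + pvB l (k + 1))
    rw [pvSExt l k k (le_refl _)]
    show max 0 (max (pvS l k k) (pvB l (k + 1))) = max (max 0 (pvS l k k)) (0 + pvB l (k + 1))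
    omega
  | succ j ihj =>
    intro hj
    show max (pvG l (k + 1) j) (pvC l (j + 1) + pvB l (j + 1) + pvS l (k + 1) (k + 1 - (j + 1))) = _
    have h1 : k + 1 - (j + 1) = (k - (j + 1)) + 1 := by omega
    rw [h1, pvSExt l k (k - (j + 1)) (by omega), ihj (by omega)]
    show max (max (pvG l k j) (pvD l j + pvB l (k + 1)))
        (pvC l (j + 1) + pvB l (j + 1) + max (pvS l k (k - (j + 1))) (pvB l (k + 1)))
      = max (max (pvG l k j) (pvC l (j + 1) + pvB l (j + 1) + pvS l k (k - (j + 1))))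
        (max (pvD l j) (pvC l (j + 1) + pvB l (j + 1)) + pvB l (k + 1))
    omega

-- The pivot characterization equals A's accumulator.
lemma pvGMain (l : List Int) : ∀ k, pvG l k k = pvRsU l k := by
  intro k
  induction k with
  | zero =>
    show max 0 (pvS l 0 0) = 0
    show max 0 (pvB l 0) = 0
    simp [pvB]
  | succ k ih =>
    show max (pvG l (k + 1) k) (pvC l (k + 1) + pvB l (k + 1) + pvS l (k + 1) (k + 1 - (k + 1))) = _
    rw [pvGExt l k k (le_refl _), ih]
    have h0 : k + 1 - (k + 1) = 0 := by omega
    rw [h0]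
    show max (max (pvRsU l k) (pvD l k + pvB l (k + 1)))
        (pvC l (k + 1) + pvB l (k + 1) + pvB l (k + 1))
      = max (pvRsU l k) (max (pvD l k) (pvC l (k + 1) + pvB l (k + 1)) + pvB l (k + 1))
    omega

-- B's value: pvRsU a at the capped pivot count.
lemma pvSolveB (n m : Int) (a : List Int)
    (hk : (if m > 0 then m else 0).toNat ≤ n.toNat) :
    solve_alt n m a = pvRsU a (if m > 0 then m else 0).toNat := by
  simp only [solve_alt]
  have hk0 : (0 : Int) ≤ if m > 0 then m else 0 := by split <;> omega
  set k : Int := if m > 0 then m else 0 with hkdef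
  set K := k.toNat with hK
  set N := n.toNat with hN
  have hp : (PySem.List.pyRange 0 n 1).foldl
      (fun p i => p ++ [PySem.List.pyGetD p (-1) 0 + PySem.List.pyGetD a i 0]) [0]
      = (List.range (N + 1)).map (pvB a) := by
    by_cases hn : 0 ≤ n
    · have hnN : n = ((N : Nat) : Int) := by omega
      rw [hnN, PySem.List.pyRange_zero_nat N, pvPrefix a N]
    · have hN0 : N = 0 := by omega
      rw [PySem.List.pyRange_one_eq_nil (by omega), hN0]
      simp [List.range_succ, pvB]
  rw [hp]
  have hq : (PySem.List.pyRange 0 (k + 1) 1).map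
        (fun j => PySem.List.pyGetD ((List.range (N + 1)).map (pvB a)) j 0)
      = (List.range (K + 1)).map (pvB a) := by
    have hkK : k + 1 = ((K + 1 : Nat) : Int) := by omega
    rw [hkK, PySem.List.pyRange_zero_nat (K + 1), List.map_map]
    apply List.map_congr_left
    intro j hj
    show PySem.List.pyGetD ((List.range (N + 1)).map (pvB a)) ((j : Nat) : Int) 0 = pvB a j
    exact pvGetMap (pvB a) N j (by simp at hj; omega)
  rw [hq, pvRevMap (pvB a) K, pvScan a K K, pvRevMap (pvS a K) K, List.zip_map', pvFold a K K]
  exact pvGMain a K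

-- ===== VERDICT (by name: the statement is the Claim_ definition above) =====
theorem solve_spec : Claim_equal_solve := by
  intro n m a _ hpre
  obtain ⟨hlen, hm⟩ := hpre
  unfold Spec_solve
  rw [pvSolveA n m a hlen hm]
  have hKm : (if m > 0 then m else 0).toNat = m.toNat := by split <;> omega
  have hk : (if m > 0 then m else 0).toNat ≤ n.toNat := by split <;> omega
  rw [pvSolveB n m a hk, hKm]
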